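-- pv_equiv track=rewrite | github.com/secworks/advent_of_code_2017 | day_4/day4.py | no_anagram_dup_words
-- ===== SOURCE A (Python) =====
-- def no_anagram_dup_words(line):
--     for i in range(len(line)):
--         for j in range(len(line)):
--             if (i != j) and len(line[i]) == len(line[j]):
--                 i_set = {a for a in line[i]}
--                 j_set = {a for a in line[j]}
--                 if i_set <= j_set:
--                     return False
--     return True
-- ===== SOURCE B (Python) =====
-- def no_anagram_dup_words(line):
--     # Index the words by length: one pass builds a dict mapping each word
--     # length to the list of that word's character set; only words inside the
--     # same length bucket can ever form an equal-length pair, and within a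
--     # bucket each unordered pair is checked once, in both subset directions.
--     pairs = [(len(w), set(w)) for w in line]
--     buckets = {}
--     for (n, s) in pairs:
--         buckets.setdefault(n, []).append(s)
--     for group in buckets.values():
--         while group:
--             s = group.pop(0)
--             for t in group:
--                 if s <= t or t <= s:
--                     return False
--     return True
-- ===== Notes on version B (the rewrite author's own statement) =====
-- stated objective: alternative
-- what changed: B builds a length-keyed dict of precomputed character sets in one pass and compares sets only within the same length bucket, each unordered pair once in both subset directions, instead of A's full n*n ordered index scan that rebuilds both character sets for every pair; it trades A's early exit on the first bad pair for the precomputed index.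
import Mathlib
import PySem

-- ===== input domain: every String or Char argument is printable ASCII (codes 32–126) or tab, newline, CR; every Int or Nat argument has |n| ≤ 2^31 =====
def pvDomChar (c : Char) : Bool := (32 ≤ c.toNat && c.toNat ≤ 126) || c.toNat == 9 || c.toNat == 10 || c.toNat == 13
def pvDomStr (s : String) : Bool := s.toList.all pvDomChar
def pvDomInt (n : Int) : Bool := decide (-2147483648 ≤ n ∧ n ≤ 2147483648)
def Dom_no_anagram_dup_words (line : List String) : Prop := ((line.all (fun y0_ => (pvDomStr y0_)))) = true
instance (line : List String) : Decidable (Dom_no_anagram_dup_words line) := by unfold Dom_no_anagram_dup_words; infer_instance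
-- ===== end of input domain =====

-- B replaces A's full n×n ordered index scan (which rebuilds both character sets for every
-- pair) by a length-keyed dict of precomputed character sets, comparing each unordered pair
-- once, in both subset directions, only inside a length bucket (objective: alternative).

-- ===== PORT A =====
-- the character set {a for a in w}
def pvCharSet (w : String) : PySem.Set Char := PySem.Set.ofList w.toList

-- literal port of A; the indices of `range(len(line))` are always in range, so
-- `line[i]` is ported exactly as `getD` over `List.range line.length`.
def no_anagram_dup_words (line : List String) : Bool :=
  !((List.range line.length).any fun i =>
    (List.range line.length).any fun j =>
      decide (i ≠ j) &&
        (PySem.Str.len (line.getD i "") == PySem.Str.len (line.getD j "")) &&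
        PySem.Set.issubset (pvCharSet (line.getD i "")) (pvCharSet (line.getD j "")))

-- ===== PORT B =====
-- the inner `while group: s = group.pop(0); for t in group: …` loop of Source B
def pvBucketBad : List (PySem.Set Char) → Bool
  | [] => false
  | s :: rest =>
      rest.any (fun t => PySem.Set.issubset s t || PySem.Set.issubset t s) || pvBucketBad rest

def no_anagram_dup_words_alt (line : List String) : Bool :=
  let pairs := line.map (fun w => (PySem.Str.len w, pvCharSet w))
  let buckets := pairs.foldl (fun d p => d.modify p.1 [] (· ++ [p.2])) PySem.Dict.empty
  !(buckets.values.any pvBucketBad)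

-- ===== PRECONDITION & SPEC =====
def Spec_no_anagram_dup_words (line : List String) (out : Bool) : Prop := out = no_anagram_dup_words_alt line
instance (line : List String) (out : Bool) : Decidable (Spec_no_anagram_dup_words line out) := by unfold Spec_no_anagram_dup_words; infer_instance

-- ===== CLAIM (what is proved, stated in full; the proofs are below) =====
def Claim_equal_no_anagram_dup_words : Prop := ∀ (line : List String), Dom_no_anagram_dup_words line → Spec_no_anagram_dup_words line (no_anagram_dup_words line)

-- ===== LEMMAS AND PROOFS =====

-- the symmetric "equal length and one char-set contained in the other" property that
-- both programs detect, phrased positionally as a two-element sublist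
def pvBadPair (xs : List String) : Prop :=
  ∃ a b, List.Sublist [a, b] xs ∧ PySem.Str.len a = PySem.Str.len b ∧
    (PySem.Set.issubset (pvCharSet a) (pvCharSet b) = true ∨
     PySem.Set.issubset (pvCharSet b) (pvCharSet a) = true)

theorem pair_sublist_of_idx {α : Type} (xs : List α) (i j : Nat) (hi : i < j) (hj : j < xs.length) :
    List.Sublist [xs[i]'(by omega), xs[j]] xs := by
  have h2 : List.Sublist [xs[j]] (xs.drop (i+1)) := by
    rw [List.singleton_sublist]
    have : xs[j] = (xs.drop (i+1))[j - (i+1)]'(by simp; omega) := by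
      simp [List.getElem_drop]; congr 1; omega
    rw [this]; exact List.getElem_mem _
  have h3 : List.Sublist ([xs[i]'(by omega)] ++ [xs[j]]) (xs.take (i+1) ++ xs.drop (i+1)) := by
    apply List.Sublist.append _ h2
    rw [List.singleton_sublist]
    have : xs[i]'(by omega) = (xs.take (i+1))[i]'(by simp; omega) := by simp
    rw [this]; exact List.getElem_mem _
  simpa using h3

theorem idx_of_pair_sublist {α : Type} (xs : List α) (a b : α) (h : List.Sublist [a, b] xs) :
    ∃ i j, ∃ (hij : i < j) (hj : j < xs.length), xs[i]'(by omega) = a ∧ xs[j] = b := by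
  obtain ⟨is, heq, hp⟩ := List.sublist_eq_map_getElem h
  match is, heq, hp with
  | [⟨i, hi⟩, ⟨j, hj⟩], heq, hp =>
    simp at heq hp
    exact ⟨i, j, hp, hj, heq.1.symm, heq.2.symm⟩

theorem a_false_iff (xs : List String) :
    no_anagram_dup_words xs = false ↔ pvBadPair xs := by
  unfold no_anagram_dup_words
  simp only [Bool.not_eq_false', List.any_eq_true, List.mem_range, decide_eq_true_eq,
    Bool.and_eq_true, beq_iff_eq]
  constructor
  · rintro ⟨i, hi, j, hj, ⟨hne, hlen⟩, hsub⟩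
    have hgi : xs.getD i "" = xs[i]'hi := List.getD_eq_getElem xs "" hi
    have hgj : xs.getD j "" = xs[j]'hj := List.getD_eq_getElem xs "" hj
    rw [hgi, hgj] at hlen hsub
    rcases Nat.lt_or_ge i j with hij | hij
    · exact ⟨xs[i], xs[j], pair_sublist_of_idx xs i j hij hj, hlen, Or.inl hsub⟩
    · have hji : j < i := by omega
      exact ⟨xs[j], xs[i], pair_sublist_of_idx xs j i hji hi, hlen.symm, Or.inr hsub⟩
  · rintro ⟨a, b, hsl, hlen, hsub | hsub⟩
    · obtain ⟨i, j, hij, hj, hia, hjb⟩ := idx_of_pair_sublist xs a b hsl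
      refine ⟨i, by omega, j, hj, ⟨by omega, ?_⟩, ?_⟩
      · rw [List.getD_eq_getElem xs "" (by omega), List.getD_eq_getElem xs "" hj, hia, hjb, hlen]
      · rw [List.getD_eq_getElem xs "" (by omega), List.getD_eq_getElem xs "" hj, hia, hjb]; exact hsub
    · obtain ⟨i, j, hij, hj, hia, hjb⟩ := idx_of_pair_sublist xs a b hsl
      refine ⟨j, hj, i, by omega, ⟨by omega, ?_⟩, ?_⟩
      · rw [List.getD_eq_getElem xs "" hj, List.getD_eq_getElem xs "" (show i < xs.length by omega), hia, hjb]
        exact hlen.symm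
      · rw [List.getD_eq_getElem xs "" hj, List.getD_eq_getElem xs "" (show i < xs.length by omega), hia, hjb]
        exact hsub

theorem pvBucketBad_iff (g : List (PySem.Set Char)) :
    pvBucketBad g = true ↔ ∃ s t, List.Sublist [s, t] g ∧
      (PySem.Set.issubset s t = true ∨ PySem.Set.issubset t s = true) := by
  induction g with
  | nil => simp [pvBucketBad]
  | cons x rest ih =>
    simp only [pvBucketBad, Bool.or_eq_true, List.any_eq_true, Bool.or_eq_true, ih]
    constructor
    · rintro (⟨t, ht, hsub⟩ | ⟨s, t, hsl, hsub⟩)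
      · exact ⟨x, t, by rw [List.cons_sublist_cons]; exact List.singleton_sublist.mpr ht, hsub⟩
      · exact ⟨s, t, hsl.cons x, hsub⟩
    · rintro ⟨s, t, hsl, hsub⟩
      rw [List.sublist_cons_iff] at hsl
      rcases hsl with hsl | ⟨r, hr, hrs⟩
      · exact Or.inr ⟨s, t, hsl, hsub⟩
      · cases hr
        exact Or.inl ⟨t, List.singleton_sublist.mp hrs, hsub⟩

-- a dict whose keys are Nodup: each item's value is recovered by getD at its key
theorem getD_of_mem_items_list (l : List (Int × List (PySem.Set Char))) (k : Int)
    (v : List (PySem.Set Char)) (h : (l.map Prod.fst).Nodup) (hm : (k, v) ∈ l) :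
    (PySem.Dict.mk l).getD k [] = v := by
  induction l with
  | nil => simp at hm
  | cons kv rest ih =>
    obtain ⟨k1, v1⟩ := kv
    simp only [List.map_cons, List.nodup_cons] at h
    rcases List.mem_cons.mp hm with heq | hmem
    · injection heq with h1 h2
      subst h1; subst h2
      simp [PySem.Dict.getD, PySem.Dict.get?_mk_cons]
    · have hne : ((k1, v1).1 == k) = false := by
        apply beq_false_of_ne
        intro he
        exact h.1 (by simpa [← he] using List.mem_map_of_mem (f := Prod.fst) hmem)
      have := ih h.2 hmem
      simpa [PySem.Dict.getD, PySem.Dict.get?_mk_cons, hne] using this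

theorem values_any_iff (d : PySem.Dict Int (List (PySem.Set Char)))
    (h : d.keys.Nodup) (f : List (PySem.Set Char) → Bool) :
    (d.values.any f = true) ↔ ∃ k ∈ d.keys, f (d.getD k []) = true := by
  show (d.items.map Prod.snd).any f = true ↔ ∃ k ∈ d.items.map Prod.fst, f (d.getD k []) = true
  simp only [List.any_map, List.any_eq_true, List.mem_map, Function.comp]
  constructor
  · rintro ⟨kv, hkv, hf⟩
    refine ⟨kv.1, ⟨kv, hkv, rfl⟩, ?_⟩
    rwa [show d = PySem.Dict.mk d.items from rfl, getD_of_mem_items_list d.items kv.1 kv.2 h hkv]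
  · rintro ⟨k, ⟨kv, hkv, rfl⟩, hf⟩
    refine ⟨kv, hkv, ?_⟩
    rwa [show d = PySem.Dict.mk d.items from rfl, getD_of_mem_items_list d.items kv.1 kv.2 h hkv] at hf

theorem b_false_iff (xs : List String) :
    no_anagram_dup_words_alt xs = false ↔ pvBadPair xs := by
  unfold no_anagram_dup_words_alt
  simp only [Bool.not_eq_false']
  rw [values_any_iff _ (by apply PySem.Dict.nodup_keys_foldl_modify_key; simp)]
  rw [PySem.Dict.keys_foldl_modify_key]
  rw [show (PySem.Dict.empty : PySem.Dict Int (List (PySem.Set Char))).keys = [] from rfl,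
    PySem.Set.update_nil_left]
  constructor
  · rintro ⟨k, hk, hbad⟩
    rw [PySem.Dict.getD_foldl_modify_append] at hbad
    rw [pvBucketBad_iff] at hbad
    obtain ⟨s, t, hsl, hsub⟩ := hbad
    rw [show (PySem.Dict.empty : PySem.Dict Int (List (PySem.Set Char))).getD k [] = [] from rfl,
      List.nil_append, List.filter_map] at hsl
    rw [List.map_map] at hsl
    rw [List.sublist_map_iff] at hsl
    obtain ⟨l'', hsl'', heq⟩ := hsl
    match l'', heq with
    | [a, b], heq =>
      simp only [List.map_cons, List.map_nil, List.cons.injEq, Function.comp] at heq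
      have hmem := List.filter_sublist (l := xs) (p := (fun p => p.1 == k) ∘ fun w => (PySem.Str.len w, pvCharSet w))
      have hamem := hsl''.subset (show a ∈ [a, b] by simp)
      have hbmem := hsl''.subset (show b ∈ [a, b] by simp)
      have ha := List.of_mem_filter hamem
      have hb := List.of_mem_filter hbmem
      simp only [Function.comp, beq_iff_eq] at ha hb
      refine ⟨a, b, hsl''.trans hmem, by rw [ha, hb], ?_⟩
      rw [← heq.1, ← heq.2.1]
      exact hsub
  · rintro ⟨a, b, hsl, hlen, hsub⟩
    refine ⟨PySem.Str.len a, ?_, ?_⟩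
    · rw [PySem.Set.mem_ofList, List.map_map]
      exact List.mem_map_of_mem (hsl.subset (by simp))
    · rw [PySem.Dict.getD_foldl_modify_append, pvBucketBad_iff]
      refine ⟨pvCharSet a, pvCharSet b, ?_, hsub⟩
      rw [show (PySem.Dict.empty : PySem.Dict Int (List (PySem.Set Char))).getD (PySem.Str.len a) [] = [] from rfl,
        List.nil_append, List.filter_map, List.map_map]
      have hfilter : List.filter (fun w => PySem.Str.len w == PySem.Str.len a) [a, b] = [a, b] := by
        have h := hlen
        simp [PySem.Str.len] at h ⊢
        omega
      have h1 : List.Sublist [a, b] (xs.filter (fun w => PySem.Str.len w == PySem.Str.len a)) := by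
        rw [← hfilter]; exact hsl.filter _
      have h2 : List.Sublist [pvCharSet a, pvCharSet b]
          ((xs.filter (fun w => PySem.Str.len w == PySem.Str.len a)).map pvCharSet) := by
        simpa using h1.map pvCharSet
      exact h2

-- ===== VERDICT (by name: the statement is the Claim_ definition above) =====
theorem no_anagram_dup_words_spec : Claim_equal_no_anagram_dup_words := by
  intro line _
  unfold Spec_no_anagram_dup_words
  have h := (a_false_iff line).trans (b_false_iff line).symm
  cases ha : no_anagram_dup_words line <;> cases hb : no_anagram_dup_words_alt line <;> simp_all
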